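-- pv_equiv track=rewrite | github.com/NoxFly/inf202-Projet-Davis-and-Putnam-Multi-Thread | projet1/projet_corentin.py | progDep
-- ===== SOURCE A (Python) =====
-- def progDep(listoflists):
-- 	#Before
-- 	Before = []
-- 	for i in range(len(listoflists)): #chiffre correspondant au nombre de sous tableau
-- 		minibefore = [0]*len(listoflists)
-- 		for tab in listoflists[i][2:]: #tout les variable utiliser pour les sous tableau
-- 			if tab != -1:
-- 				for j in range(i):
-- 					if (tab == listoflists[j][0]):
-- 						minibefore[j] = 1
--
-- 		Before.append(minibefore)
--
-- 	return Before
-- ===== SOURCE B (Python) =====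
-- def progDep(listoflists):
--     n = len(listoflists)
--     heads = {}   # variable value -> list of earlier row indices defining it
--     before = []
--     for i, row in enumerate(listoflists):
--         mini = [0] * n
--         for tab in row[2:]:
--             if tab != -1:
--                 for j in heads.get(tab, []):
--                     mini[j] = 1
--         before.append(mini)
--         if row:
--             heads.setdefault(row[0], []).append(i)
--     return before
-- ===== Notes on version B (the rewrite author's own statement) =====
-- stated objective: faster
-- what changed: Instead of rescanning all earlier rows for every referenced variable (nested j-loop), B maintains a dict from head value to the list of earlier row indices, built incrementally in one pass, so each reference is resolved by one lookup.
import Mathlib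
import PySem

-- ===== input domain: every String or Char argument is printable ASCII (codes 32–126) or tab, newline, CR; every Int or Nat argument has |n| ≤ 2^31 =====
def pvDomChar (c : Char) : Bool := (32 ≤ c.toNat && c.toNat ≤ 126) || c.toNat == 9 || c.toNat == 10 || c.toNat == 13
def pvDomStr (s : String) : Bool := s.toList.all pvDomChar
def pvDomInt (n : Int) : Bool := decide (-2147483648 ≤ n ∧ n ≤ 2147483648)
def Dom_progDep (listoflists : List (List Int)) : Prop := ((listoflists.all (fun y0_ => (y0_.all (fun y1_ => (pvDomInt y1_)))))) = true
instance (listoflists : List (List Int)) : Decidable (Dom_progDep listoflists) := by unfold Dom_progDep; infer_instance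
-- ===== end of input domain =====

-- B replaces A's rescan of all earlier rows per referenced variable by an incrementally built
-- dict from head value to earlier row indices (objective: faster, asymptotic).

-- ===== PORT A =====
-- Literal port of A.  `tab == listoflists[j][0]` is ported as `head? == some tab`: on rows
-- where Python would raise IndexError (empty listoflists[j]) the inputs are excluded by Pre_.
def progDep (listoflists : List (List Int)) : List (List Int) :=
  (List.range listoflists.length).foldl
    (fun Before i =>
      Before ++ [((listoflists.getD i []).drop 2).foldl
        (fun minibefore tab =>
          if tab ≠ -1 then
            (List.range i).foldl
              (fun mb j =>
                if (listoflists.getD j []).head? == some tab then mb.set j 1 else mb)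
              minibefore
          else minibefore)
        (List.replicate listoflists.length (0 : Int))])
    []

-- ===== PORT B =====
-- Port of Source B: one pass with `enumerate` (index carried in the state), a dict
-- heads : value -> list of earlier row indices with that head; setdefault(...).append = Dict.modify.
def progDep_alt (listoflists : List (List Int)) : List (List Int) :=
  (listoflists.foldl
    (fun (st : PySem.Dict Int (List Nat) × List (List Int) × Nat) row =>
      let heads := st.1
      let before := st.2.1
      let i := st.2.2
      let mini := (row.drop 2).foldl
        (fun mb tab =>
          if tab ≠ -1 then
            (heads.getD tab []).foldl (fun mb2 j => mb2.set j 1) mb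
          else mb)
        (List.replicate listoflists.length (0 : Int))
      match row with
      | [] => (heads, before ++ [mini], i + 1)
      | h :: _ => (heads.modify h [] (· ++ [i]), before ++ [mini], i + 1))
    (PySem.Dict.empty, [], 0)).2.1

-- ===== PRECONDITION & SPEC =====
-- Pre_ excludes exactly the inputs where Python A raises IndexError: a row that references
-- some variable (entry != -1 past position 2) preceded by an empty row.
def Pre_progDep (listoflists : List (List Int)) : Prop :=
  ∀ i < listoflists.length,
    ((listoflists.getD i []).drop 2).any (fun t => t != -1) = true →
      ∀ j < i, listoflists.getD j [] ≠ []
instance (listoflists : List (List Int)) : Decidable (Pre_progDep listoflists) := by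
  unfold Pre_progDep; infer_instance

def pvWitness_progDep : List (List Int) := [[1, 0, 2], [2, 0, 1], [3, 0, 1, 2]]

def Spec_progDep (listoflists : List (List Int)) (out : List (List Int)) : Prop :=
  out = progDep_alt listoflists
instance (listoflists : List (List Int)) (out : List (List Int)) : Decidable (Spec_progDep listoflists out) := by unfold Spec_progDep; infer_instance

-- ===== CLAIM (what is proved, stated in full; the proofs are below) =====
def Claim_equal_progDep : Prop := ∀ (listoflists : List (List Int)), Dom_progDep listoflists → Pre_progDep listoflists → Spec_progDep listoflists (progDep listoflists)

-- ===== LEMMAS AND PROOFS =====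

-- the indices j < i whose row head equals v
def pvMarks (l : List (List Int)) (i : Nat) (v : Int) : List Nat :=
  (List.range i).filter (fun j => (l.getD j []).head? == some v)

-- the i-th row of the result, written with pvMarks
def pvRow (l : List (List Int)) (i : Nat) : List Int :=
  ((l.getD i []).drop 2).foldl
    (fun mb tab =>
      if tab ≠ -1 then (pvMarks l i tab).foldl (fun mb2 j => mb2.set j 1) mb else mb)
    (List.replicate l.length (0 : Int))

-- a conditional-set fold over a list equals the unconditional fold over the filtered list
theorem pvCondFold (p : Nat → Bool) (L : List Nat) (mb : List Int) :
    L.foldl (fun m j => if p j = true then m.set j 1 else m) mb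
      = (L.filter p).foldl (fun m j => m.set j 1) mb := by
  induction L generalizing mb with
  | nil => rfl
  | cons a L ih =>
    by_cases h : p a = true <;> simp [List.foldl_cons, h, ih]

theorem pvA_eq (l : List (List Int)) :
    progDep l = (List.range l.length).map (pvRow l) := by
  unfold progDep
  rw [PySem.List.foldl_append_singleton_eq_map]
  refine List.map_congr_left (fun i _ => ?_)
  unfold pvRow
  refine List.foldl_ext _ _ _ (fun mb tab _ => ?_)
  by_cases h : tab ≠ -1
  · rw [if_pos h, if_pos h]
    unfold pvMarks
    exact pvCondFold (fun j => (l.getD j []).head? == some tab) (List.range i) mb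
  · simp [h]

theorem pvMarks_succ (l : List (List Int)) (k : Nat) (v : Int) :
    pvMarks l (k + 1) v
      = pvMarks l k v ++ (if (l.getD k []).head? == some v then [k] else []) := by
  unfold pvMarks
  rw [List.range_succ, List.filter_append]
  by_cases h : ((l.getD k []).head? == some v) = true <;>
    simp only [List.getD] at h ⊢ <;> simp [List.filter, h]

theorem pvB_inv (l : List (List Int)) :
    ∀ (rows : List (List Int)) (k : Nat) (heads : PySem.Dict Int (List Nat))
      (before : List (List Int)),
      rows = l.drop k →
      (∀ v, heads.getD v [] = pvMarks l k v) →
      (rows.foldl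
        (fun (st : PySem.Dict Int (List Nat) × List (List Int) × Nat) row =>
          let heads := st.1
          let before := st.2.1
          let i := st.2.2
          let mini := (row.drop 2).foldl
            (fun mb tab =>
              if tab ≠ -1 then
                (heads.getD tab []).foldl (fun mb2 j => mb2.set j 1) mb
              else mb)
            (List.replicate l.length (0 : Int))
          match row with
          | [] => (heads, before ++ [mini], i + 1)
          | h :: _ => (heads.modify h [] (· ++ [i]), before ++ [mini], i + 1))
        (heads, before, k)).2.1
        = before ++ (List.range' k rows.length).map (pvRow l) := by
  intro rows
  induction rows with
  | nil => intro k heads before _ _; simp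
  | cons row rest ih =>
    intro k heads before hdrop hinv
    have hget : l.getD k [] = row := by
      have h0 : l[k]? = (l.drop k)[0]? := by
        rw [List.getElem?_drop]; norm_num
      rw [← hdrop] at h0
      simp only [List.getD, h0]; rfl
    have hrest : rest = l.drop (k + 1) := by
      have := congrArg List.tail hdrop
      simpa [List.tail_drop] using this
    have hmini :
        (row.drop 2).foldl
          (fun mb tab =>
            if tab ≠ -1 then
              (heads.getD tab []).foldl (fun mb2 j => mb2.set j 1) mb
            else mb)
          (List.replicate l.length (0 : Int)) = pvRow l k := by
      unfold pvRow
      rw [hget]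
      exact List.foldl_ext _ _ _ (fun mb tab _ => by rw [hinv tab])
    have hinv' : ∀ heads' : PySem.Dict Int (List Nat),
        (∀ v, heads'.getD v [] = pvMarks l (k + 1) v) →
        ∀ mini before',
        ((rest.foldl
          (fun (st : PySem.Dict Int (List Nat) × List (List Int) × Nat) row =>
            let heads := st.1
            let before := st.2.1
            let i := st.2.2
            let mini := (row.drop 2).foldl
              (fun mb tab =>
                if tab ≠ -1 then
                  (heads.getD tab []).foldl (fun mb2 j => mb2.set j 1) mb
                else mb)
              (List.replicate l.length (0 : Int))
            match row with
            | [] => (heads, before ++ [mini], i + 1)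
            | h :: _ => (heads.modify h [] (· ++ [i]), before ++ [mini], i + 1))
          (heads', before' ++ [mini], k + 1)).2.1)
          = before' ++ [mini] ++ (List.range' (k + 1) rest.length).map (pvRow l) :=
      fun heads' hv mini before' => ih (k + 1) heads' (before' ++ [mini]) hrest hv
    match row, hget, hmini with
    | [], hget, hmini =>
      simp only [List.foldl_cons]
      rw [hinv' heads (fun v => by
            rw [hinv v, pvMarks_succ, hget]
            simp) _ before, hmini]
      simp [List.range'_succ]
    | h :: t, hget, hmini =>
      simp only [List.foldl_cons]
      rw [hinv' (heads.modify h [] (· ++ [k])) (fun v => by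
            rw [PySem.Dict.getD_modify, pvMarks_succ, hget, hinv v]
            by_cases hv : v = h
            · subst hv; simp [hinv v]
            · have : ¬ ((some h : Option Int) == some v) = true := by
                simp [Ne.symm hv]
              simp [hv, this]) _ before, hmini]
      simp [List.range'_succ]

theorem pvB_eq (l : List (List Int)) :
    progDep_alt l = (List.range l.length).map (pvRow l) := by
  unfold progDep_alt
  rw [pvB_inv l l 0 PySem.Dict.empty [] (by simp) (fun v => by
        simp [pvMarks, PySem.Dict.getD_empty])]
  simp [List.range_eq_range']

-- ===== VERDICT (by name: the statement is the Claim_ definition above) =====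
theorem progDep_spec : Claim_equal_progDep := by
  intro l _ _
  unfold Spec_progDep
  rw [pvA_eq, pvB_eq]
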